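-- pv_equiv track=rewrite | github.com/acampove/ap_utilities | src/ap_utilities_scripts/make_fields.py | _rename_repeated
-- ===== SOURCE A (Python) =====
-- def _rename_repeated(l_par : list[str]) -> list[str]:
--     d_par_freq = {}
--     for par in l_par:
--         if par not in d_par_freq:
--             d_par_freq[par] = 1
--             continue
--
--         d_par_freq[par]+= 1
--
--     l_par_renamed = []
--     for par, freq in d_par_freq.items():
--         if freq == 1:
--             l_par_renamed.append(par)
--         else:
--             l_par_renamed += [ f'{par}_{i_par}' for i_par in range(1, freq + 1) ]
--
--     return l_par_renamed
-- ===== SOURCE B (Python) =====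
-- def _rename_repeated(l_par : list[str]) -> list[str]:
--     l_par_renamed = []
--     l_left = l_par
--     while l_left:
--         head = l_left[0]
--         rest = [par for par in l_left if par != head]
--         freq = len(l_left) - len(rest)
--         if freq == 1:
--             l_par_renamed.append(head)
--         else:
--             l_par_renamed.extend(f'{head}_{i_par}' for i_par in range(1, freq + 1))
--         l_left = rest
--     return l_par_renamed
-- ===== Notes on version B (the rewrite author's own statement) =====
-- stated objective: alternative
-- what changed: B replaces A's two staged passes (build a frequency dict, then walk its items) by a partition worklist loop: repeatedly take the first remaining element, filter out all its occurrences, emit its group from the length drop, and continue on the remainder.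
import Mathlib
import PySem

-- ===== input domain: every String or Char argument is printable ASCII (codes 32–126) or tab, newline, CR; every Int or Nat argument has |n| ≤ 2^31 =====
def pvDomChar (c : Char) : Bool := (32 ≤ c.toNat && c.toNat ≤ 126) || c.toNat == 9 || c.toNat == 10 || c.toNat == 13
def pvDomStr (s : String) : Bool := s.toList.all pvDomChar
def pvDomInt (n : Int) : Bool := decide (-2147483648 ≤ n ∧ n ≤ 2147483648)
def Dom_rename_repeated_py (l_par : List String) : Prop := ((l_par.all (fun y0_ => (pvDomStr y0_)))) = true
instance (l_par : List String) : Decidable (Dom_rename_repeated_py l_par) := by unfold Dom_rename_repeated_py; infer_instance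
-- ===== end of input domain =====

-- B replaces A's dict-then-items passes by partition-and-recurse on the first element (alternative; return value only).
-- ===== PORT A =====
def rename_repeated_py (l_par : List String) : List String :=
  (l_par.foldl (fun d par =>
      if d.contains par = false then d.insert par 1
      else d.insert par (d.getD par 0 + 1)) (PySem.Dict.empty : PySem.Dict String Int)).items.foldl (fun out pf =>
    if pf.2 == 1 then out ++ [pf.1]
    else out ++ (PySem.List.pyRange 1 (pf.2 + 1) 1).map
      (fun i => pf.1 ++ "_" ++ PySem.Int.toStr i)) []

-- ===== PORT B =====
-- the while loop of B: (l_left, l_par_renamed) state, one partition step per iteration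
def renameAltLoop (l_left : List String) (l_par_renamed : List String) : List String :=
  match l_left with
  | [] => l_par_renamed
  | head :: t =>
    let rest := (head :: t).filter (fun par => decide (par ≠ head))
    let freq : Int := ((head :: t).length : Int) - (rest.length : Int)
    renameAltLoop rest
      (if freq == 1 then l_par_renamed ++ [head]
       else l_par_renamed ++ (PySem.List.pyRange 1 (freq + 1) 1).map
         (fun i => head ++ "_" ++ PySem.Int.toStr i))
termination_by l_left.length
decreasing_by
  simp only [List.filter]
  simp [List.length_filter_le]

def rename_repeated_py_alt (l_par : List String) : List String :=
  renameAltLoop l_par []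

-- ===== PRECONDITION & SPEC =====
def Spec_rename_repeated_py (l_par : List String) (out : List String) : Prop := out = rename_repeated_py_alt l_par
instance (l_par : List String) (out : List String) : Decidable (Spec_rename_repeated_py l_par out) := by unfold Spec_rename_repeated_py; infer_instance

-- ===== CLAIM (what is proved, stated in full; the proofs are below) =====
def Claim_equal_rename_repeated_py : Prop := ∀ (l_par : List String), Dom_rename_repeated_py l_par → Spec_rename_repeated_py l_par (rename_repeated_py l_par)

-- ===== LEMMAS AND PROOFS =====

-- the group of output names contributed by one distinct item with frequency k
def pvGroup (p : String) (k : Int) : List String :=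
  if k == 1 then [p]
  else (PySem.List.pyRange 1 (k + 1) 1).map (fun i => p ++ "_" ++ PySem.Int.toStr i)

-- the common normal form of both programs
def pvSpec (l : List String) : List String :=
  (PySem.Set.ofList l).flatMap (fun p => pvGroup p (l.count p))

-- A's counting loop builds exactly collections.Counter(l_par)
theorem rename_freq_eq_counter (l_par : List String) :
    l_par.foldl (fun d par =>
      if d.contains par = false then d.insert par 1
      else d.insert par (d.getD par 0 + 1)) PySem.Dict.empty = PySem.Dict.counter l_par := by
  rw [← PySem.Dict.foldl_insert_getD_add_one_eq_counter]
  apply PySem.List.foldl_congr_mem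
  intro d par _
  by_cases h : d.contains par = false
  · rw [h]
    simp [PySem.Dict.getD_of_not_contains (h := h)]
  · simp [h]

theorem rename_A_eq_spec (l : List String) : rename_repeated_py l = pvSpec l := by
  unfold rename_repeated_py pvSpec
  rw [rename_freq_eq_counter, PySem.Dict.items_counter, List.foldl_map]
  have : ∀ (out : List String) (p : String),
      (if ((l.count p : Int)) == 1 then out ++ [p]
       else out ++ (PySem.List.pyRange 1 ((l.count p : Int) + 1) 1).map
         (fun i => p ++ "_" ++ PySem.Int.toStr i)) = out ++ pvGroup p (l.count p) := by
    intro out p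
    unfold pvGroup
    split <;> rfl
  simp only [this]
  rw [PySem.List.foldl_append_eq_flatMap]
  simp

-- Set.add is a no-op on a member
theorem set_add_mem {α : Type} [DecidableEq α] (s : PySem.Set α) (x : α) (hx : x ∈ s) :
    PySem.Set.add s x = s := by
  simp [PySem.Set.add, PySem.Set.contains, hx]

-- folding add over a list with x's filtered out equals folding over the list, once x is in the accumulator
theorem foldl_add_filter {α : Type} [DecidableEq α] (l : List α) (acc : PySem.Set α) (x : α)
    (hx : x ∈ acc) :
    (l.filter (fun p => decide (p ≠ x))).foldl PySem.Set.add acc = l.foldl PySem.Set.add acc := by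
  induction l generalizing acc with
  | nil => rfl
  | cons a t ih =>
    rw [List.filter_cons]
    by_cases h : a = x
    · have hc : decide (a ≠ x) = false := by simp [h]
      rw [hc]
      simp only [Bool.false_eq_true, if_false, List.foldl_cons]
      rw [h, set_add_mem acc x hx, ih acc hx]
    · have hc : decide (a ≠ x) = true := by simp [h]
      rw [hc]
      simp only [if_true, List.foldl_cons]
      apply ih
      simp only [PySem.Set.add]
      split
      · exact hx
      · exact List.mem_append_left _ hx

-- an element absent from the list can be carried at the head of the accumulator
theorem foldl_add_cons_acc {α : Type} [DecidableEq α] (l : List α) (acc : PySem.Set α) (x : α)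
    (hx : x ∉ l) :
    l.foldl PySem.Set.add (x :: acc) = x :: l.foldl PySem.Set.add acc := by
  induction l generalizing acc with
  | nil => rfl
  | cons a t ih =>
    have hax : a ≠ x := fun h => hx (h ▸ List.mem_cons_self)
    have hxt : x ∉ t := fun h => hx (List.mem_cons_of_mem _ h)
    simp only [List.foldl_cons]
    have : PySem.Set.add (x :: acc) a = x :: PySem.Set.add acc a := by
      simp [PySem.Set.add, PySem.Set.contains, hax]
      split <;> simp
    rw [this, ih _ hxt]

-- ordered dedup of h :: t is h followed by the ordered dedup of the tail with h removed
theorem ofList_cons_filter (h : String) (t : List String) :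
    PySem.Set.ofList (h :: t) = h :: PySem.Set.ofList (t.filter (fun p => decide (p ≠ h))) := by
  rw [PySem.Set.ofList_eq_foldl, PySem.Set.ofList_eq_foldl]
  simp only [List.foldl_cons]
  have h1 : PySem.Set.add ([] : PySem.Set String) h = [h] := by rfl
  rw [h1, ← foldl_add_filter t [h] h (by simp)]
  rw [foldl_add_cons_acc _ [] h (by simp)]

theorem rename_B_eq_spec_aux (n : Nat) : ∀ (l out : List String), l.length ≤ n →
    renameAltLoop l out = out ++ pvSpec l := by
  induction n with
  | zero =>
    intro l out hl
    have : l = [] := List.eq_nil_of_length_eq_zero (Nat.le_zero.mp hl)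
    subst this
    rw [renameAltLoop]
    simp [pvSpec, PySem.Set.ofList_eq_foldl]
  | succ n ih =>
    intro l out hl
    match l with
    | [] =>
      rw [renameAltLoop]
      simp [pvSpec, PySem.Set.ofList_eq_foldl]
    | head :: t =>
      rw [renameAltLoop]
      have hrest : (head :: t).filter (fun par => decide (par ≠ head))
          = t.filter (fun par => decide (par ≠ head)) := by
        simp
      set rest := t.filter (fun par => decide (par ≠ head)) with hrestdef
      rw [hrest]
      have hlenle : rest.length ≤ t.length := List.length_filter_le _ _
      have hlen : rest.length + (head :: t).count head = (head :: t).length := by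
        have hsplit : t.length = (t.filter (fun par => decide (par ≠ head))).length
            + (t.filter fun par => !decide (par ≠ head)).length :=
          List.length_eq_length_filter_add _
        have heq : (t.filter fun par => !decide (par ≠ head))
            = t.filter (fun par => par == head) := by
          apply List.filter_congr
          intro x _
          by_cases hx : x = head <;> simp [hx]
        have hcnt : t.count head = (t.filter (fun par => par == head)).length := by
          rw [List.count_eq_countP, List.countP_eq_length_filter]
        rw [List.count_cons_self, hcnt]
        rw [heq] at hsplit
        simp only [List.length_cons, hrestdef]
        omega
      have hfreq : (((head :: t).length : Int)) - ((rest.length : Int))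
          = (((head :: t).count head : Int)) := by
        omega
      rw [hfreq]
      have hih : renameAltLoop rest (out ++ pvGroup head (((head :: t).count head : Int)))
          = (out ++ pvGroup head (((head :: t).count head : Int))) ++ pvSpec rest := by
        apply ih
        simp only [List.length_cons] at hl
        omega
      have hgroup : (if (((head :: t).count head : Int) == 1) = true then out ++ [head]
          else out ++ (PySem.List.pyRange 1 (((head :: t).count head : Int) + 1) 1).map
            (fun i => head ++ "_" ++ PySem.Int.toStr i))
          = out ++ pvGroup head (((head :: t).count head : Int)) := by
        unfold pvGroup
        split <;> rfl
      rw [hgroup, hih, List.append_assoc]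
      congr 1
      show pvGroup head (((head :: t).count head : Int)) ++ pvSpec rest = pvSpec (head :: t)
      unfold pvSpec
      rw [ofList_cons_filter, ← hrestdef]
      simp only [List.flatMap_cons]
      congr 1
      apply List.flatMap_congr
      intro p hp
      have hpmem : p ∈ rest := (PySem.Set.mem_ofList rest p).mp hp
      have hpne : p ≠ head := by
        rw [hrestdef] at hpmem
        simp at hpmem
        exact hpmem.2
      have hcount : (head :: t).count p = rest.count p := by
        rw [hrestdef, List.count_filter (by simp [hpne])]
        simp [Ne.symm hpne]
      rw [hcount]

theorem rename_B_eq_spec (l : List String) : rename_repeated_py_alt l = pvSpec l :=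
  rename_B_eq_spec_aux l.length l [] (le_refl _)

-- ===== VERDICT (by name: the statement is the Claim_ definition above) =====
theorem rename_repeated_py_spec : Claim_equal_rename_repeated_py := by
  intro l _
  unfold Spec_rename_repeated_py
  rw [rename_A_eq_spec, rename_B_eq_spec]
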